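-- pv_equiv track=rewrite | github.com/GregoryChaseJohnson/red_pen | renderer/run/align_final_sentences.py | identify_red_blocks
-- ===== SOURCE A (Python) =====
-- def identify_red_blocks(final_sentence):
--     """
--     Identify red blocks allowing a single space inside the block.
--     Red tokens define a block. A single space is allowed within a block.
--     More than one consecutive space or a non-red, non-space token ends the block.
--     """
--     def is_red(token):
--         return token.get('color', 'normal') == 'red'
--     def is_space_char(token):
--         return token['char'].isspace()
--
--     def add_block(blocks, start, end):
--         if start is not None and end is not None and end >= start:
--             blocks.append({'block_start': start, 'block_end': end})
--
--     blocks = []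
--     block_start = None
--     space_count = 0
--
--     for idx, token in enumerate(final_sentence):
--         if is_red(token):
--             if block_start is None:
--                 block_start = idx
--             space_count = 0
--         elif is_space_char(token):
--             space_count += 1
--             if space_count > 1:
--                 # More than one consecutive space ends the block
--                 add_block(blocks, block_start, idx - space_count)
--                 block_start = None
--                 space_count = 0
--         else:
--             # Non-red, non-space ends the block
--             add_block(blocks, block_start, idx - 1 - space_count)
--             block_start = None
--             space_count = 0
--
--     # Close any remaining block
--     add_block(blocks, block_start, len(final_sentence) - 1 - space_count)
--
--     return blocks
-- ===== SOURCE B (Python) =====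
-- def identify_red_blocks(final_sentence):
--     # Two-phase: categorize each token once ('r' red / 's' space / 'o' other),
--     # then consume maximal r(s?r)* blocks from the category sequence.
--     cats = []
--     for token in final_sentence:
--         if token.get('color', 'normal') == 'red':
--             cats.append('r')
--         elif token['char'].isspace():
--             cats.append('s')
--         else:
--             cats.append('o')
--     blocks = []
--     i, n = 0, len(cats)
--     while i < n:
--         if cats[i] != 'r':
--             i += 1
--             continue
--         start = i
--         last = i
--         i += 1
--         while True:
--             if i < n and cats[i] == 'r':
--                 last = i
--                 i += 1
--             elif i + 1 < n and cats[i] == 's' and cats[i + 1] == 'r':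
--                 last = i + 1
--                 i += 2
--             else:
--                 break
--         blocks.append({'block_start': start, 'block_end': last})
--     return blocks
-- ===== Notes on version B (the rewrite author's own statement) =====
-- stated objective: alternative
-- what changed: B first maps every token to a category code (r/s/o) and then emits maximal r(s?r)* runs with a nested block-consuming scan, replacing A's single state machine with a space counter and back-computed block ends.
import Mathlib
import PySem

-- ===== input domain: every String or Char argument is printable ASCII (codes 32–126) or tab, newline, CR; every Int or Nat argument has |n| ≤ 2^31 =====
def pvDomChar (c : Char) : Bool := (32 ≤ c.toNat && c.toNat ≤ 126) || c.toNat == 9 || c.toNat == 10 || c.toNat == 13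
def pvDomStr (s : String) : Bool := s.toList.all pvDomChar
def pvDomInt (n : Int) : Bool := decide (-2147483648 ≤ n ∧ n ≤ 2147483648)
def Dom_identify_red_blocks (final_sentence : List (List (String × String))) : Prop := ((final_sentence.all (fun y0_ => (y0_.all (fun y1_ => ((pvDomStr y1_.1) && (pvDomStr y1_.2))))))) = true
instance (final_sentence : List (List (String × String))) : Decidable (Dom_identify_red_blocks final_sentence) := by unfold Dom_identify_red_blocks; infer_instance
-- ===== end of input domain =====

-- B categorizes every token once (r/s/o) and then consumes maximal r(s?r)* runs from that
-- sequence, instead of A's single state machine with a space counter and back-computed ends.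

-- ===== PORT A =====
-- is_red(token): token.get('color', 'normal') == 'red'
def pvIsRed (tok : List (String × String)) : Bool :=
  (PySem.Dict.ofList tok).getD "color" "normal" == "red"

-- is_space_char(token): token['char'].isspace(); the .getD "" stands in for the KeyError
-- case, which Pre_identify_red_blocks excludes
def pvIsSpace (tok : List (String × String)) : Bool :=
  PySem.Str.strIsspace (((PySem.Dict.ofList tok).get? "char").getD "")

-- add_block(blocks, start, end)
def pvAddBlock (blocks : List (List (String × Int))) (bs : Option Int) (e : Int) :
    List (List (String × Int)) :=
  match bs with
  | some s => if s ≤ e then blocks ++ [[("block_start", s), ("block_end", e)]] else blocks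
  | none => blocks

-- the 'for idx, token in enumerate(final_sentence)' loop, state (blocks, block_start, space_count)
def pvLoopA : List (List (String × String)) → Nat → List (List (String × Int)) →
    Option Int → Int → (List (List (String × Int)) × Option Int × Int)
  | [], _, blocks, bs, sc => (blocks, bs, sc)
  | tok :: rest, idx, blocks, bs, sc =>
    if pvIsRed tok then
      pvLoopA rest (idx + 1) blocks (if bs.isNone then some (idx : Int) else bs) 0
    else if pvIsSpace tok then
      if sc + 1 > 1 then
        pvLoopA rest (idx + 1) (pvAddBlock blocks bs ((idx : Int) - (sc + 1))) none 0
      else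
        pvLoopA rest (idx + 1) blocks bs (sc + 1)
    else
      pvLoopA rest (idx + 1) (pvAddBlock blocks bs ((idx : Int) - 1 - sc)) none 0

def identify_red_blocks (final_sentence : List (List (String × String))) : List (List (String × Int)) :=
  match pvLoopA final_sentence 0 [] none 0 with
  | (blocks, bs, sc) => pvAddBlock blocks bs ((final_sentence.length : Int) - 1 - sc)

-- ===== PORT B =====
-- one token → category code 'r' / 's' / 'o' (the first loop of Source B, as a map)
def pvCat (tok : List (String × String)) : Char :=
  if pvIsRed tok then 'r' else if pvIsSpace tok then 's' else 'o'

-- inner while loop: consume 'r' / 's','r' steps, tracking (last, pos, rest)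
def pvConsume : List Char → Nat → Nat → Nat × Nat × List Char
  | 'r' :: t, pos, _ => pvConsume t (pos + 1) pos
  | 's' :: 'r' :: t, pos, _ => pvConsume t (pos + 2) (pos + 1)
  | rest, pos, last => (last, pos, rest)

-- termination measure for pvScan (the inner loop only advances)
theorem pvConsume_length (t : List Char) (pos last : Nat) :
    (pvConsume t pos last).2.2.length ≤ t.length := by
  fun_induction pvConsume <;> simp_all <;> omega

-- outer while loop over the category sequence
def pvScan : List Char → Nat → List (List (String × Int))
  | [], _ => []
  | c :: t, i =>
    if c = 'r' then
      match h : pvConsume t (i + 1) i with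
      | (last, pos, rest) =>
        [("block_start", (i : Int)), ("block_end", (last : Int))] :: pvScan rest pos
    else pvScan t (i + 1)
termination_by cats _ => cats.length
decreasing_by
  · have := pvConsume_length t (i + 1) i
    rw [h] at this
    simp at this ⊢
    omega
  · simp

def identify_red_blocks_alt (final_sentence : List (List (String × String))) : List (List (String × Int)) :=
  pvScan (final_sentence.map pvCat) 0

-- ===== PRECONDITION & SPEC =====
-- Pre_ excludes exactly the inputs on which A raises KeyError: a non-red token without a 'char' key.
def Pre_identify_red_blocks (final_sentence : List (List (String × String))) : Prop :=
  ∀ tok ∈ final_sentence, pvIsRed tok = true ∨ ((PySem.Dict.ofList tok).get? "char").isSome = true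
instance (final_sentence : List (List (String × String))) : Decidable (Pre_identify_red_blocks final_sentence) := by
  unfold Pre_identify_red_blocks; infer_instance

def pvWitness_identify_red_blocks : (List (List (String × String))) :=
  [[("color", "red")], [("char", " ")], [("color", "red"), ("char", "a")], [("char", "x")]]

def Spec_identify_red_blocks (final_sentence : List (List (String × String))) (out : List (List (String × Int))) : Prop := out = identify_red_blocks_alt final_sentence
instance (final_sentence : List (List (String × String))) (out : List (List (String × Int))) : Decidable (Spec_identify_red_blocks final_sentence out) := by unfold Spec_identify_red_blocks; infer_instance

-- ===== CLAIM (what is proved, stated in full; the proofs are below) =====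
def Claim_equal_identify_red_blocks : Prop := ∀ (final_sentence : List (List (String × String))), Dom_identify_red_blocks final_sentence → Pre_identify_red_blocks final_sentence → Spec_identify_red_blocks final_sentence (identify_red_blocks final_sentence)

-- ===== LEMMAS AND PROOFS =====

-- A's loop re-expressed as a recursion over the category sequence, trailing add_block included
def pvRunA : List Char → Nat → List (List (String × Int)) → Option Int → Int →
    List (List (String × Int))
  | [], idx, blocks, bs, sc => pvAddBlock blocks bs ((idx : Int) - 1 - sc)
  | c :: t, idx, blocks, bs, sc =>
    if c = 'r' then
      pvRunA t (idx + 1) blocks (if bs.isNone then some (idx : Int) else bs) 0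
    else if c = 's' then
      if sc + 1 > 1 then
        pvRunA t (idx + 1) (pvAddBlock blocks bs ((idx : Int) - (sc + 1))) none 0
      else
        pvRunA t (idx + 1) blocks bs (sc + 1)
    else
      pvRunA t (idx + 1) (pvAddBlock blocks bs ((idx : Int) - 1 - sc)) none 0

def pvFin (st : List (List (String × Int)) × Option Int × Int) (N : Int) :
    List (List (String × Int)) :=
  pvAddBlock st.1 st.2.1 (N - 1 - st.2.2)

-- A's loop + trailing add_block factors through the category sequence
theorem pvBridgeA (fs : List (List (String × String))) :
    ∀ (idx : Nat) blocks bs sc,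
      pvFin (pvLoopA fs idx blocks bs sc) ((idx : Int) + fs.length) =
      pvRunA (fs.map pvCat) idx blocks bs sc := by
  induction fs with
  | nil => intro idx blocks bs sc; simp [pvLoopA, pvRunA, pvFin, pvAddBlock]
  | cons tok rest ih =>
    intro idx blocks bs sc
    have harith : (idx : Int) + ((rest.length + 1 : Nat) : Int) =
        ((idx + 1 : Nat) : Int) + rest.length := by push_cast; ring
    by_cases hr : pvIsRed tok = true
    · have hcat : pvCat tok = 'r' := by simp [pvCat, hr]
      simp only [List.map_cons, hcat, pvLoopA, hr, if_pos, List.length_cons]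
      rw [harith, ih]
      simp [pvRunA]
    · by_cases hs : pvIsSpace tok = true
      · have hcat : pvCat tok = 's' := by simp [pvCat, hr, hs]
        simp only [List.map_cons, hcat, pvLoopA, hr, hs, List.length_cons,
          Bool.false_eq_true, if_false, if_pos]
        by_cases hc : sc + 1 > 1
        · rw [if_pos hc, harith, ih]
          simp [pvRunA, hc]
        · rw [if_neg hc, harith, ih]
          simp [pvRunA, hc]
      · have hcat : pvCat tok = 'o' := by simp [pvCat, hr, hs]
        simp only [List.map_cons, hcat, pvLoopA, hr, hs, List.length_cons,
          Bool.false_eq_true, if_false]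
        rw [harith, ih]
        simp [pvRunA]

-- an open block (last red at index `last`, start `s`, space_count 0) runs exactly like
-- pvConsume followed by a closed run on the rest
theorem pvOpenRun :
    ∀ (n : Nat) (cats : List Char), cats.length ≤ n →
      ∀ (last : Nat) blocks (s : Int), 0 ≤ s → s ≤ (last : Int) →
        pvRunA cats (last + 1) blocks (some s) 0 =
        pvRunA (pvConsume cats (last + 1) last).2.2 (pvConsume cats (last + 1) last).2.1
          (blocks ++ [[("block_start", s), ("block_end", ((pvConsume cats (last + 1) last).1 : Int))]])
          none 0 := by
  intro n
  induction n with
  | zero =>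
    intro cats hlen last blocks s hs0 hsl
    rw [List.length_eq_zero_iff.mp (Nat.le_zero.mp hlen)]
    have hcons : pvConsume [] (last + 1) last = (last, last + 1, ([] : List Char)) := by
      simp [pvConsume]
    rw [hcons]
    simp [pvRunA, pvAddBlock]
    omega
  | succ n ih =>
    intro cats hlen last blocks s hs0 hsl
    rcases cats with _ | ⟨c, t⟩
    · have hcons : pvConsume [] (last + 1) last = (last, last + 1, ([] : List Char)) := by
        simp [pvConsume]
      rw [hcons]
      simp [pvRunA, pvAddBlock]
      omega
    · by_cases hcr : c = 'r'
      · subst hcr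
        have hcons : pvConsume ('r' :: t) (last + 1) last = pvConsume t (last + 2) (last + 1) := by
          simp [pvConsume]
        rw [hcons]
        have step : pvRunA ('r' :: t) (last + 1) blocks (some s) 0 =
            pvRunA t (last + 2) blocks (some s) 0 := by
          simp [pvRunA]
        rw [step]
        have := ih t (by simp at hlen; omega) (last + 1) blocks s hs0
          (by push_cast at hsl ⊢; omega)
        simpa [show last + 1 + 1 = last + 2 by omega] using this
      · by_cases hcs : c = 's'
        · subst hcs
          rcases t with _ | ⟨c2, t'⟩
          · have hcons : pvConsume ['s'] (last + 1) last = (last, last + 1, ['s']) := by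
              simp [pvConsume]
            rw [hcons]
            simp [pvRunA, pvAddBlock]
            omega
          · by_cases hc2r : c2 = 'r'
            · subst hc2r
              have hcons : pvConsume ('s' :: 'r' :: t') (last + 1) last =
                  pvConsume t' (last + 3) (last + 2) := by
                simp [pvConsume]
              rw [hcons]
              have step : pvRunA ('s' :: 'r' :: t') (last + 1) blocks (some s) 0 =
                  pvRunA t' (last + 3) blocks (some s) 0 := by
                simp [pvRunA]
              rw [step]
              have := ih t' (by simp at hlen; omega) (last + 2) blocks s hs0
                (by push_cast at hsl ⊢; omega)
              simpa [show last + 2 + 1 = last + 3 by omega] using this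
            · have hcons : pvConsume ('s' :: c2 :: t') (last + 1) last =
                  (last, last + 1, 's' :: c2 :: t') := by
                simp [pvConsume, hc2r]
              rw [hcons]
              by_cases hc2s : c2 = 's'
              · subst hc2s
                simp [pvRunA, pvAddBlock]
                rw [if_pos (by omega)]
                ring_nf
              · simp [pvRunA, pvAddBlock, hc2r, hc2s]
                rw [if_pos (by omega)]
        · have hcons : pvConsume (c :: t) (last + 1) last = (last, last + 1, c :: t) := by
            simp [pvConsume, hcr, hcs]
          rw [hcons]
          simp [pvRunA, pvAddBlock, hcr, hcs]
          rw [if_pos (by omega)]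

-- with no open block, A's run over the category sequence IS B's scan
theorem pvClosedRun :
    ∀ (n : Nat) (cats : List Char), cats.length ≤ n →
      ∀ (idx : Nat) blocks (sc : Int),
        pvRunA cats idx blocks none sc = blocks ++ pvScan cats idx := by
  intro n
  induction n with
  | zero =>
    intro cats hlen idx blocks sc
    rw [List.length_eq_zero_iff.mp (Nat.le_zero.mp hlen)]
    simp [pvRunA, pvScan, pvAddBlock]
  | succ n ih =>
    intro cats hlen idx blocks sc
    rcases cats with _ | ⟨c, t⟩
    · simp [pvRunA, pvScan, pvAddBlock]
    · by_cases hcr : c = 'r'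
      · subst hcr
        simp only [pvRunA, Option.isNone_none, if_pos]
        rw [pvOpenRun t.length t le_rfl idx blocks (idx : Int) (by positivity) le_rfl]
        rw [ih _ (le_trans (pvConsume_length t (idx + 1) idx) (by simp at hlen; omega))]
        conv_rhs => rw [pvScan]
        rw [if_pos rfl]
        rcases pvConsume t (idx + 1) idx with ⟨l, p, r⟩
        simp
      · by_cases hcs : c = 's'
        · subst hcs
          simp only [pvRunA, if_neg hcr]
          by_cases hc : sc + 1 > 1
          · rw [if_pos hc]
            simp only [pvAddBlock]
            rw [ih t (by simp at hlen; omega)]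
            conv_rhs => rw [pvScan]
            simp
          · rw [if_neg hc, ih t (by simp at hlen; omega)]
            conv_rhs => rw [pvScan]
            simp
        · simp only [pvRunA, if_neg hcr, if_neg hcs, pvAddBlock]
          rw [ih t (by simp at hlen; omega)]
          conv_rhs => rw [pvScan]
          simp [hcr]

-- ===== VERDICT (by name: the statement is the Claim_ definition above) =====
theorem identify_red_blocks_spec : Claim_equal_identify_red_blocks := by
  intro fs _ _
  unfold Spec_identify_red_blocks identify_red_blocks identify_red_blocks_alt
  have hb := pvBridgeA fs 0 [] none 0
  simp only [Nat.cast_zero, zero_add] at hb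
  unfold pvFin at hb
  rcases hst : pvLoopA fs 0 [] none 0 with ⟨b, s, c⟩
  rw [hst] at hb
  simp only at hb ⊢
  rw [hb, pvClosedRun (fs.map pvCat).length _ le_rfl 0 [] 0]
  simp
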